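-- pv_equiv track=rewrite | github.com/vn6295337/A2A-strategy-agent-v2 | api_real.py | parse_swot_data
-- ===== SOURCE A (Python) =====
-- from typing import Optional, Dict, Any
--
-- def parse_swot_data(draft_report: str) -> Dict[str, Any]:
--     """Parse SWOT data from the draft report"""
--     if not draft_report:
--         return {
--             "strengths": [],
--             "weaknesses": [],
--             "opportunities": [],
--             "threats": []
--         }
--
--     # Simple parsing - in production, use proper NLP parsing
--     lines = draft_report.split('\n')
--
--     strengths = []
--     weaknesses = []
--     opportunities = []
--     threats = []
--
--     current_section = None
--
--     for line in lines:
--         line = line.strip()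
--         if line.startswith('## Strengths'):
--             current_section = 'strengths'
--         elif line.startswith('## Weaknesses'):
--             current_section = 'weaknesses'
--         elif line.startswith('## Opportunities'):
--             current_section = 'opportunities'
--         elif line.startswith('## Threats'):
--             current_section = 'threats'
--         elif line.startswith('- ') and current_section:
--             item = line[2:].strip()
--             if current_section == 'strengths' and item:
--                 strengths.append(item)
--             elif current_section == 'weaknesses' and item:
--                 weaknesses.append(item)
--             elif current_section == 'opportunities' and item:
--                 opportunities.append(item)
--             elif current_section == 'threats' and item:
--                 threats.append(item)
--
--     return {
--         "strengths": strengths,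
--         "weaknesses": weaknesses,
--         "opportunities": opportunities,
--         "threats": threats
--     }
-- ===== SOURCE B (Python) =====
-- HEADERS = [('## Strengths', 'strengths'), ('## Weaknesses', 'weaknesses'),
--            ('## Opportunities', 'opportunities'), ('## Threats', 'threats')]
--
--
-- def header_key(line):
--     for prefix, key in HEADERS:
--         if line.startswith(prefix):
--             return key
--     return None
--
--
-- def split_sections(lines):
--     """Segment the stripped lines at header lines into (key, body) pieces,
--     dropping any preamble before the first header."""
--     sections = []
--     rest = lines
--     while rest:
--         key = header_key(rest[0])
--         rest = rest[1:]
--         if key is None: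
--             continue
--         body = []
--         while rest and header_key(rest[0]) is None:
--             body.append(rest[0])
--             rest = rest[1:]
--         sections.append((key, body))
--     return sections
--
--
-- def parse_swot_data(draft_report):
--     """Segment the report into header-delimited sections, then harvest the
--     bullet items of each segment into its section's list."""
--     lines = [l.strip() for l in (draft_report or '').split('\n')]
--     result = {key: [] for _, key in HEADERS}
--     for key, body in split_sections(lines):
--         result[key].extend(
--             item for item in (l[2:].strip() for l in body if l.startswith('- '))
--             if item)
--     return result
-- ===== Notes on version B (the rewrite author's own statement) =====
-- stated objective: alternative
-- what changed: B replaces A's streaming current_section state machine (four accumulator lists updated line by line under an if/elif ladder) by a segmentation pass that first splits the document at header lines into (key, body) segments and then harvests each segment's bullet items into its section's list.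
import Mathlib
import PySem

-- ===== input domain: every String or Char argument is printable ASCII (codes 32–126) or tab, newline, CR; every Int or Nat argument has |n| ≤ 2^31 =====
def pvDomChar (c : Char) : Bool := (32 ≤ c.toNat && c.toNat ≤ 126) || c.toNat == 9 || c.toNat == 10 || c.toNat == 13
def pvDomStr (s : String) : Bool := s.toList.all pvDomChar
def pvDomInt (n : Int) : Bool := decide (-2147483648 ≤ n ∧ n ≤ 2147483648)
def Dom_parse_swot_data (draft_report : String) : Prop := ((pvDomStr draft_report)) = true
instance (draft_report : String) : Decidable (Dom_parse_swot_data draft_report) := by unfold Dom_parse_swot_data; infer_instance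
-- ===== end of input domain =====

-- B replaces A's streaming current_section state machine by a recursive segmentation of the
-- document at header lines into (key, body) pieces, harvested afterwards (alternative decomposition).

-- ===== PORT A =====
-- A's loop body after 'line = line.strip()'
def pvACore (acc : (List String × List String × List String × List String) × Option String)
    (line : String) : (List String × List String × List String × List String) × Option String :=
  let s := acc.1.1; let w := acc.1.2.1; let o := acc.1.2.2.1; let t := acc.1.2.2.2
  let cur := acc.2
  if PySem.Str.startswith line "## Strengths" then ((s, w, o, t), some "strengths")
  else if PySem.Str.startswith line "## Weaknesses" then ((s, w, o, t), some "weaknesses")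
  else if PySem.Str.startswith line "## Opportunities" then ((s, w, o, t), some "opportunities")
  else if PySem.Str.startswith line "## Threats" then ((s, w, o, t), some "threats")
  else if PySem.Str.startswith line "- " && cur.isSome then
    let item := PySem.Str.strip (PySem.Str.slice line (some 2) none)
    if cur == some "strengths" && item != "" then ((s ++ [item], w, o, t), cur)
    else if cur == some "weaknesses" && item != "" then ((s, w ++ [item], o, t), cur)
    else if cur == some "opportunities" && item != "" then ((s, w, o ++ [item], t), cur)
    else if cur == some "threats" && item != "" then ((s, w, o, t ++ [item]), cur)
    else ((s, w, o, t), cur)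
  else ((s, w, o, t), cur)

def pvAStep (acc : (List String × List String × List String × List String) × Option String)
    (line0 : String) : (List String × List String × List String × List String) × Option String :=
  pvACore acc (PySem.Str.strip line0)

def parse_swot_data (draft_report : String) : List (String × List String) :=
  if draft_report == "" then
    [("strengths", []), ("weaknesses", []), ("opportunities", []), ("threats", [])]
  else
    let lines := (PySem.Str.split? draft_report "\n").getD []   -- sep "\n" ≠ "": split? is some
    let st := lines.foldl pvAStep (([], [], [], []), none)
    [("strengths", st.1.1), ("weaknesses", st.1.2.1),
     ("opportunities", st.1.2.2.1), ("threats", st.1.2.2.2)]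

-- ===== PORT B =====
def pvHeaders : List (String × String) :=
  [("## Strengths", "strengths"), ("## Weaknesses", "weaknesses"),
   ("## Opportunities", "opportunities"), ("## Threats", "threats")]

def pvHeaderKey (line : String) : Option String :=
  (pvHeaders.find? (fun pk => PySem.Str.startswith line pk.1)).map (·.2)

-- split_body: longest prefix of non-header lines, plus the remainder
def pvSplitBody : List String → List String × List String
  | [] => ([], [])
  | l :: ls =>
    if (pvHeaderKey l).isNone then
      let p := pvSplitBody ls
      (l :: p.1, p.2)
    else ([], l :: ls)

-- needed by pvSplitSections's termination argument
theorem pvSplitBody_rest_le (ls : List String) : (pvSplitBody ls).2.length ≤ ls.length := by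
  induction ls with
  | nil => simp [pvSplitBody]
  | cons l ls ih =>
    simp only [pvSplitBody]
    split
    · exact Nat.le_succ_of_le ih
    · simp

-- split_sections: segment the document at header lines into (key, body) pieces
def pvSplitSections : List String → List (String × List String)
  | [] => []
  | l :: ls =>
    match pvHeaderKey l with
    | none => pvSplitSections ls
    | some key =>
      let p := pvSplitBody ls
      (key, p.1) :: pvSplitSections p.2
  termination_by ls => ls.length
  decreasing_by
    · simp
    · exact Nat.lt_succ_of_le (pvSplitBody_rest_le ls)

-- bullet items of a segment body: (item for item in (l[2:].strip() for l in body if l.startswith('- ')) if item)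
def pvItems (body : List String) : List String :=
  ((body.filter (fun l => PySem.Str.startswith l "- ")).map
    (fun l => PySem.Str.strip (PySem.Str.slice l (some 2) none))).filter (fun it => it != "")

def parse_swot_data_alt (draft_report : String) : List (String × List String) :=
  let src := if draft_report == "" then "" else draft_report   -- (draft_report or '')
  let lines := ((PySem.Str.split? src "\n").getD []).map PySem.Str.strip   -- sep ≠ "": split? is some
  let init : PySem.Dict String (List String) := PySem.Dict.ofList (pvHeaders.map (fun pk => (pk.2, [])))
  ((pvSplitSections lines).foldl
    (fun d kb => PySem.Dict.modify d kb.1 [] (fun v => v ++ pvItems kb.2)) init).items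

-- ===== PRECONDITION & SPEC =====
def Spec_parse_swot_data (draft_report : String) (out : List (String × List String)) : Prop := out = parse_swot_data_alt draft_report
instance (draft_report : String) (out : List (String × List String)) : Decidable (Spec_parse_swot_data draft_report out) := by unfold Spec_parse_swot_data; infer_instance

-- ===== CLAIM =====
def Claim_equal_parse_swot_data : Prop := ∀ (draft_report : String), Dom_parse_swot_data draft_report → Spec_parse_swot_data draft_report (parse_swot_data draft_report)

-- ===== LEMMAS AND PROOFS =====

theorem pvSS_nil : pvSplitSections [] = [] := by
  rw [pvSplitSections]

theorem pvSS_none (l : String) (ls : List String) (h : pvHeaderKey l = none) :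
    pvSplitSections (l :: ls) = pvSplitSections ls := by
  rw [pvSplitSections, h]

theorem pvSS_some (l : String) (ls : List String) (k : String) (h : pvHeaderKey l = some k) :
    pvSplitSections (l :: ls) = (k, (pvSplitBody ls).1) :: pvSplitSections (pvSplitBody ls).2 := by
  rw [pvSplitSections, h]

-- B's find?-based header lookup as A's if-chain
theorem pvHeaderKey_eq (l : String) : pvHeaderKey l =
    (if PySem.Str.startswith l "## Strengths" then some "strengths"
     else if PySem.Str.startswith l "## Weaknesses" then some "weaknesses"
     else if PySem.Str.startswith l "## Opportunities" then some "opportunities"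
     else if PySem.Str.startswith l "## Threats" then some "threats"
     else none) := by
  by_cases h1 : PySem.Str.startswith l "## Strengths" = true <;>
  by_cases h2 : PySem.Str.startswith l "## Weaknesses" = true <;>
  by_cases h3 : PySem.Str.startswith l "## Opportunities" = true <;>
  by_cases h4 : PySem.Str.startswith l "## Threats" = true <;>
    simp only [pvHeaderKey, pvHeaders, List.find?, h1, h2, h3, h4,
      Bool.false_eq_true, if_true, if_false, Option.map_some, Option.map_none]

-- quadruple view of the result dict
def pvToDict (q : List String × List String × List String × List String) :
    PySem.Dict String (List String) :=
  PySem.Dict.mk [("strengths", q.1), ("weaknesses", q.2.1),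
                 ("opportunities", q.2.2.1), ("threats", q.2.2.2)]

def pvExtend (q : List String × List String × List String × List String) (k : String)
    (xs : List String) : List String × List String × List String × List String :=
  if k = "strengths" then (q.1 ++ xs, q.2.1, q.2.2.1, q.2.2.2)
  else if k = "weaknesses" then (q.1, q.2.1 ++ xs, q.2.2.1, q.2.2.2)
  else if k = "opportunities" then (q.1, q.2.1, q.2.2.1 ++ xs, q.2.2.2)
  else (q.1, q.2.1, q.2.2.1, q.2.2.2 ++ xs)

def pvApply (q : List String × List String × List String × List String)
    (segs : List (String × List String)) : List String × List String × List String × List String :=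
  segs.foldl (fun q kb => pvExtend q kb.1 (pvItems kb.2)) q

def pvKeys : List String := ["strengths", "weaknesses", "opportunities", "threats"]

theorem pvSections_keys (ls : List String) :
    ∀ kb ∈ pvSplitSections ls, kb.1 ∈ pvKeys := by
  induction ls using pvSplitSections.induct with
  | case1 => simp [pvSS_nil]
  | case2 l ls h ih => rw [pvSS_none l ls h]; exact ih
  | case3 l ls key h p ih =>
    rw [pvSS_some l ls key h]
    intro kb hkb
    rcases List.mem_cons.mp hkb with h1 | h2
    · subst h1
      have : key ∈ pvHeaders.map (·.2) := by
        simp only [pvHeaderKey, Option.map_eq_some_iff] at h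
        obtain ⟨pk, hfind, hk⟩ := h
        exact hk ▸ List.mem_map_of_mem (List.mem_of_find?_eq_some hfind)
      simpa [pvHeaders, pvKeys] using this
    · exact ih kb h2

theorem pvExtend_nil (q : List String × List String × List String × List String) (k : String) :
    pvExtend q k [] = q := by
  unfold pvExtend; split_ifs <;> simp

theorem pvExtend_cons (q : List String × List String × List String × List String) (k : String)
    (x : String) (xs : List String) :
    pvExtend q k (x :: xs) = pvExtend (pvExtend q k [x]) k xs := by
  unfold pvExtend; split_ifs <;> simp

-- the combined state-machine ↔ segmentation invariant
theorem pvMain (ls : List String) :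
    ∀ q : List String × List String × List String × List String,
      ((ls.foldl pvACore (q, none)).1 = pvApply q (pvSplitSections ls))
      ∧ ∀ k ∈ pvKeys,
          (ls.foldl pvACore (q, some k)).1
            = pvApply (pvExtend q k (pvItems (pvSplitBody ls).1))
                (pvSplitSections (pvSplitBody ls).2) := by
  induction ls with
  | nil =>
    intro q
    refine ⟨by rw [pvSS_nil]; rfl, ?_⟩
    intro k _
    show q = pvApply (pvExtend q k (pvItems (pvSplitBody []).1)) (pvSplitSections (pvSplitBody []).2)
    rw [show pvSplitBody ([] : List String) = ([], []) from rfl]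
    simp only [pvSS_nil, pvApply, List.foldl_nil]
    rw [show pvItems [] = [] from rfl, pvExtend_nil]
  | cons l ls ih =>
    intro q
    constructor
    · -- current_section = None
      simp only [List.foldl_cons]
      by_cases h1 : PySem.Str.startswith l "## Strengths" = true
      · have hkey : pvHeaderKey l = some "strengths" := by rw [pvHeaderKey_eq]; simp only [h1]; rfl
        have hstep : pvACore (q, none) l = (q, some "strengths") := by simp only [pvACore, h1]; rfl
        rw [hstep, pvSS_some _ _ _ hkey]
        exact (ih q).2 "strengths" (by simp [pvKeys])
      · by_cases h2 : PySem.Str.startswith l "## Weaknesses" = true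
        · have hkey : pvHeaderKey l = some "weaknesses" := by rw [pvHeaderKey_eq]; simp only [h1, h2]; rfl
          have hstep : pvACore (q, none) l = (q, some "weaknesses") := by simp only [pvACore, h1, h2]; rfl
          rw [hstep, pvSS_some _ _ _ hkey]
          exact (ih q).2 "weaknesses" (by simp [pvKeys])
        · by_cases h3 : PySem.Str.startswith l "## Opportunities" = true
          · have hkey : pvHeaderKey l = some "opportunities" := by
              rw [pvHeaderKey_eq]; simp only [h1, h2, h3]; rfl
            have hstep : pvACore (q, none) l = (q, some "opportunities") := by
              simp only [pvACore, h1, h2, h3]; rfl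
            rw [hstep, pvSS_some _ _ _ hkey]
            exact (ih q).2 "opportunities" (by simp [pvKeys])
          · by_cases h4 : PySem.Str.startswith l "## Threats" = true
            · have hkey : pvHeaderKey l = some "threats" := by
                rw [pvHeaderKey_eq]; simp only [h1, h2, h3, h4]; rfl
              have hstep : pvACore (q, none) l = (q, some "threats") := by
                simp only [pvACore, h1, h2, h3, h4]; rfl
              rw [hstep, pvSS_some _ _ _ hkey]
              exact (ih q).2 "threats" (by simp [pvKeys])
            · have hkey : pvHeaderKey l = none := by
                rw [pvHeaderKey_eq]; simp only [h1, h2, h3, h4]; rfl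
              have hstep : pvACore (q, none) l = (q, none) := by
                simp only [pvACore, h1, h2, h3, h4]; simp
              rw [hstep, pvSS_none _ _ hkey]
              exact (ih q).1
    · -- current_section = Some k
      intro k hk
      simp only [List.foldl_cons]
      by_cases hdr : (pvHeaderKey l).isSome
      · -- a header line ends the current section's body here
        obtain ⟨k', hkey⟩ := Option.isSome_iff_exists.mp hdr
        have hbody : pvSplitBody (l :: ls) = ([], l :: ls) := by
          simp only [pvSplitBody, hkey]; rfl
        have hstep : pvACore (q, some k) l = (q, some k') := by
          rw [pvHeaderKey_eq] at hkey
          simp only [pvACore]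
          split_ifs at hkey ⊢ <;> simp_all
        rw [hbody, hstep]
        simp only [pvItems, List.filter_nil, List.map_nil, pvExtend_nil]
        rw [pvSS_some _ _ _ hkey]
        have hk' : k' ∈ pvKeys := by
          rw [pvHeaderKey_eq] at hkey
          split_ifs at hkey <;> simp_all [pvKeys]
        exact (ih q).2 k' hk'
      · -- non-header line inside section k
        rw [Option.not_isSome_iff_eq_none] at hdr
        have hbody : pvSplitBody (l :: ls)
            = (l :: (pvSplitBody ls).1, (pvSplitBody ls).2) := by
          simp only [pvSplitBody, hdr]; rfl
        rw [hbody]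
        rw [pvHeaderKey_eq] at hdr
        have h1 : PySem.Str.startswith l "## Strengths" = false := by
          cases hcase : PySem.Str.startswith l "## Strengths"
          · rfl
          · rw [hcase] at hdr; simp at hdr
        rw [h1] at hdr
        simp only [Bool.false_eq_true, if_false] at hdr
        have h2 : PySem.Str.startswith l "## Weaknesses" = false := by
          cases hcase : PySem.Str.startswith l "## Weaknesses"
          · rfl
          · rw [hcase] at hdr; simp at hdr
        rw [h2] at hdr
        simp only [Bool.false_eq_true, if_false] at hdr
        have h3 : PySem.Str.startswith l "## Opportunities" = false := by
          cases hcase : PySem.Str.startswith l "## Opportunities"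
          · rfl
          · rw [hcase] at hdr; simp at hdr
        rw [h3] at hdr
        simp only [Bool.false_eq_true, if_false] at hdr
        have h4 : PySem.Str.startswith l "## Threats" = false := by
          cases hcase : PySem.Str.startswith l "## Threats"
          · rfl
          · rw [hcase] at hdr; simp at hdr
        by_cases h5 : PySem.Str.startswith l "- " = true
        · by_cases h6 : PySem.Str.strip (PySem.Str.slice l (some 2) none) = ""
          · -- bullet with empty item: dropped by both
            have hstep : pvACore (q, some k) l = (q, some k) := by
              simp only [pvACore, h1, h2, h3, h4, h5, h6]; simp
            have hitems : pvItems (l :: (pvSplitBody ls).1) = pvItems (pvSplitBody ls).1 := by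
              simp only [pvItems, List.filter_cons, h5]; simp [h6]
            rw [hstep, hitems]
            exact (ih q).2 k hk
          · -- bullet with nonempty item: appended to section k
            have h6' : (PySem.Str.strip (PySem.Str.slice l (some 2) none) != "") = true :=
              bne_iff_ne.mpr h6
            have hitems : pvItems (l :: (pvSplitBody ls).1)
                = PySem.Str.strip (PySem.Str.slice l (some 2) none)
                    :: pvItems (pvSplitBody ls).1 := by
              simp only [pvItems, List.filter_cons, h5]; simp [h6]
            rw [hitems, pvExtend_cons]
            have hstep : pvACore (q, some k) l
                = (pvExtend q k [PySem.Str.strip (PySem.Str.slice l (some 2) none)], some k) := by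
              rcases (by simpa [pvKeys] using hk : k = "strengths" ∨ k = "weaknesses" ∨
                  k = "opportunities" ∨ k = "threats") with h | h | h | h <;> subst h <;>
                simp only [pvACore, pvExtend, h1, h2, h3, h4, h5, h6'] <;> rfl
            rw [hstep]
            exact (ih _).2 k hk
        · -- not a bullet: nothing happens
          have hstep : pvACore (q, some k) l = (q, some k) := by
            simp only [pvACore, h1, h2, h3, h4, h5]; rfl
          have hitems : pvItems (l :: (pvSplitBody ls).1) = pvItems (pvSplitBody ls).1 := by
            simp only [pvItems, List.filter_cons, h5]; simp
          rw [hstep, hitems]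
          exact (ih q).2 k hk

-- the dict fold over segments equals the quadruple fold, listified
theorem pvDictApply (segs : List (String × List String)) :
    ∀ q, (∀ kb ∈ segs, kb.1 ∈ pvKeys) →
      segs.foldl (fun d kb => PySem.Dict.modify d kb.1 [] (fun v => v ++ pvItems kb.2)) (pvToDict q)
        = pvToDict (pvApply q segs) := by
  induction segs with
  | nil => intro q _; rfl
  | cons kb segs ih =>
    intro q hmem
    have hk : kb.1 ∈ pvKeys := hmem kb (List.mem_cons_self)
    have hstep :
        PySem.Dict.modify (pvToDict q) kb.1 [] (fun v => v ++ pvItems kb.2)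
          = pvToDict (pvExtend q kb.1 (pvItems kb.2)) := by
      rcases (by simpa [pvKeys] using hk : kb.1 = "strengths" ∨ kb.1 = "weaknesses" ∨
          kb.1 = "opportunities" ∨ kb.1 = "threats") with h | h | h | h <;>
        rw [h] <;>
        simp [pvToDict, PySem.Dict.modify, PySem.Dict.insert, PySem.Dict.contains,
          PySem.Dict.getD, PySem.Dict.get?, pvExtend]
    simp only [List.foldl_cons, hstep]
    exact ih _ (fun x hx => hmem x (List.mem_cons_of_mem _ hx))

-- ===== VERDICT =====
theorem parse_swot_data_spec : Claim_equal_parse_swot_data := by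
  intro d _hd
  unfold Spec_parse_swot_data parse_swot_data parse_swot_data_alt
  have hinit : PySem.Dict.ofList (pvHeaders.map (fun pk => (pk.2, ([] : List String))))
      = pvToDict ([], [], [], []) := by decide
  by_cases h : d = ""
  · subst h
    simp only [BEq.rfl, if_true, hinit]
    have hlines : ((PySem.Str.split? "" "\n").getD []).map PySem.Str.strip = [""] := by decide
    rw [hlines, pvSS_none _ _ (by decide), pvSS_nil]
    rfl
  · have hb : (d == "") = false := by simp [h]
    simp only [hb, Bool.false_eq_true, if_false]
    set ls := (PySem.Str.split? d "\n").getD [] with hls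
    have hA : (ls.foldl pvAStep (([], [], [], []), none)).1
        = pvApply ([], [], [], []) (pvSplitSections (ls.map PySem.Str.strip)) := by
      have : ls.foldl pvAStep (([], [], [], []), none)
          = (ls.map PySem.Str.strip).foldl pvACore (([], [], [], []), none) := by
        rw [List.foldl_map]; rfl
      rw [this]
      exact (pvMain (ls.map PySem.Str.strip) (([], [], [], []))).1
    have hB := pvDictApply (pvSplitSections (ls.map PySem.Str.strip)) ([], [], [], [])
      (pvSections_keys (ls.map PySem.Str.strip))
    rw [hinit, hB, hA]
    rfl
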